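-- pv_equiv track=rewrite | github.com/ryanmore759/Initials2 | initials2.py | get_initials
-- ===== SOURCE A (Python) =====
-- def get_initials(full_name):
--     complete_name = full_name.title()
--     list_of_names = complete_name.split()
--     two_name = list_of_names
--     number_of_names = len(list_of_names)
--
--     if(number_of_names == 2):
--         first_names = list_of_names[:0]
--         initials = ''.join(name[0] for name in first_names)
--         initials2 = ''.join(name[0] for name in two_name)
--         return initials + initials2
--
--     else:
--         initials = ''.join(name[0] for name in two_name)
--         return initials
-- ===== SOURCE B (Python) =====
-- def get_initials(full_name):
--     # Single left-to-right scan: collect the uppercased first character of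
--     # each whitespace-delimited word, without building a token list.
--     letters = []
--     prev_was_space = True
--     for c in full_name:
--         if prev_was_space and not c.isspace():
--             letters.append(c.upper())
--         prev_was_space = c.isspace()
--     return ''.join(letters)
-- ===== Notes on version B (the rewrite author's own statement) =====
-- stated objective: simpler
-- what changed: Replaces title()+split()+join over a built token list by a single left-to-right character scan that tracks whether the previous character was whitespace and collects the uppercased first character of each word.
import Mathlib
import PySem

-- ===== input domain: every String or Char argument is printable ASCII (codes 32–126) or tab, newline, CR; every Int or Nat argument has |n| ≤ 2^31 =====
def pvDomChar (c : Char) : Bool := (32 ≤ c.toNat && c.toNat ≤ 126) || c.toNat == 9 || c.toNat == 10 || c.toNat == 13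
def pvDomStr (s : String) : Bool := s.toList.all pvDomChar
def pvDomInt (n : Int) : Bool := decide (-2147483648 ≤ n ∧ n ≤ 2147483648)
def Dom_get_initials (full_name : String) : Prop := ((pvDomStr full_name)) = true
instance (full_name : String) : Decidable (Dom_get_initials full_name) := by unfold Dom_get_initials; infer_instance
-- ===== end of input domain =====

-- B replaces A's title()+split()+join pipeline by a single character scan tracking
-- whether the previous character was whitespace (same result, different decomposition).


-- ===== PORT A =====
-- str.title(), hand-ported (PySem has no title): a letter is uppercased after a
-- non-letter and lowercased after a letter; other characters are unchanged
-- (cased = ASCII letter, exact on the ASCII input domain).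
def pyTitleGo : List Char → Bool → List Char
  | [], _ => []
  | c :: cs, prevAlpha =>
    (if PySem.Chars.isalpha c then
       (if prevAlpha then PySem.Chars.lowerChar c else PySem.Chars.upperChar c)
     else c) :: pyTitleGo cs (PySem.Chars.isalpha c)

def pyTitle (cs : List Char) : List Char := pyTitleGo cs false

def get_initials (full_name : String) : String :=
  let complete_name := pyTitle full_name.toList
  let list_of_names := PySem.Chars.split₀ complete_name
  let two_name := list_of_names
  let number_of_names := list_of_names.length
  if number_of_names = 2 then
    -- name[0] never raises: words of split() are nonempty (headD is only a totalizer)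
    let first_names := PySem.List.slice list_of_names none (some 0)
    let initials := PySem.Chars.join [] (first_names.map (fun name => [name.headD ' ']))
    let initials2 := PySem.Chars.join [] (two_name.map (fun name => [name.headD ' ']))
    String.ofList (initials ++ initials2)
  else
    String.ofList (PySem.Chars.join [] (two_name.map (fun name => [name.headD ' '])))

-- ===== PORT B =====
def get_initials_alt (full_name : String) : String :=
  let r := full_name.toList.foldl
    (fun (st : List Char × Bool) c =>
      ((if st.2 && !(PySem.Chars.isspace c) then st.1 ++ [PySem.Chars.upperChar c] else st.1),
       PySem.Chars.isspace c))
    ([], true)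
  String.ofList (PySem.Chars.join [] (r.1.map (fun l => [l])))

-- ===== PRECONDITION & SPEC =====
def Spec_get_initials (full_name : String) (out : String) : Prop := out = get_initials_alt full_name
instance (full_name : String) (out : String) : Decidable (Spec_get_initials full_name out) := by unfold Spec_get_initials; infer_instance

-- ===== CLAIM (what is proved, stated in full; the proofs are below) =====
def Claim_equal_get_initials : Prop := ∀ (full_name : String), Dom_get_initials full_name → Spec_get_initials full_name (get_initials full_name)

-- ===== LEMMAS AND PROOFS =====

-- the first characters of the whitespace-delimited words of cs (p = "previous was space")
def pvCollect : List Char → Bool → List Char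
  | [], _ => []
  | c :: cs, p =>
    if p && !(PySem.Chars.isspace c) then c :: pvCollect cs (PySem.Chars.isspace c)
    else pvCollect cs (PySem.Chars.isspace c)

-- the same, uppercased (what B collects)
def pvCollectU : List Char → Bool → List Char
  | [], _ => []
  | c :: cs, p =>
    if p && !(PySem.Chars.isspace c) then
      PySem.Chars.upperChar c :: pvCollectU cs (PySem.Chars.isspace c)
    else pvCollectU cs (PySem.Chars.isspace c)

theorem pv_lower_bounds (c : Char) (h : PySem.Chars.islower c = true) :
    97 ≤ c.toNat ∧ c.toNat ≤ 122 := by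
  simp only [PySem.Chars.islower, Bool.and_eq_true, decide_eq_true_eq, Char.le_def] at h
  exact ⟨UInt32.le_iff_toNat_le.mp h.1, UInt32.le_iff_toNat_le.mp h.2⟩

theorem pv_upper_bounds (c : Char) (h : PySem.Chars.isupper c = true) :
    65 ≤ c.toNat ∧ c.toNat ≤ 90 := by
  simp only [PySem.Chars.isupper, Bool.and_eq_true, decide_eq_true_eq, Char.le_def] at h
  exact ⟨UInt32.le_iff_toNat_le.mp h.1, UInt32.le_iff_toNat_le.mp h.2⟩

theorem pv_toNat_ofNat (n : Nat) (h1 : 65 ≤ n) (h2 : n ≤ 122) : (Char.ofNat n).toNat = n := by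
  have hv : n.isValidChar := Or.inl (by omega)
  simp [Char.ofNat, hv, Char.ofNatAux, Char.toNat]

theorem pv_isspace_toNat (c : Char) (h1 : 65 ≤ c.toNat) (h2 : c.toNat ≤ 122) :
    PySem.Chars.isspace c = false := by
  simp only [PySem.Chars.isspace, Bool.or_eq_false_iff, Bool.and_eq_false_iff,
    decide_eq_false_iff_not]
  omega

theorem pv_isspace_of_isalpha (c : Char) (h : PySem.Chars.isalpha c = true) :
    PySem.Chars.isspace c = false := by
  simp only [PySem.Chars.isalpha, Bool.or_eq_true] at h
  rcases h with h | h
  · have := pv_upper_bounds c h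
    exact pv_isspace_toNat c (by omega) (by omega)
  · have := pv_lower_bounds c h
    exact pv_isspace_toNat c (by omega) (by omega)

theorem pv_not_alpha_of_isspace (c : Char) (h : PySem.Chars.isspace c = true) :
    PySem.Chars.isalpha c = false := by
  cases ha : PySem.Chars.isalpha c
  · rfl
  · rw [pv_isspace_of_isalpha c ha] at h
    exact absurd h (by simp)

theorem pv_isupper_eq_false_of_islower (c : Char) (h : PySem.Chars.islower c = true) :
    PySem.Chars.isupper c = false := by
  cases hu : PySem.Chars.isupper c
  · rfl
  · have h1 := pv_lower_bounds c h
    have h2 := pv_upper_bounds c hu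
    omega

theorem pv_islower_eq_false_of_isupper (c : Char) (h : PySem.Chars.isupper c = true) :
    PySem.Chars.islower c = false := by
  cases hl : PySem.Chars.islower c
  · rfl
  · have h1 := pv_lower_bounds c hl
    have h2 := pv_upper_bounds c h
    omega

theorem pv_isspace_upperChar (c : Char) (h : PySem.Chars.islower c = true) :
    PySem.Chars.isspace (PySem.Chars.upperChar c) = false := by
  have hb := pv_lower_bounds c h
  have hl : (PySem.Chars.upperChar c).toNat = c.toNat - 32 := by
    simp only [PySem.Chars.upperChar, h, if_true]
    exact pv_toNat_ofNat _ (by omega) (by omega)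
  exact pv_isspace_toNat _ (by omega) (by omega)

theorem pv_isspace_lowerChar (c : Char) (h : PySem.Chars.isupper c = true) :
    PySem.Chars.isspace (PySem.Chars.lowerChar c) = false := by
  have hb := pv_upper_bounds c h
  have hl : (PySem.Chars.lowerChar c).toNat = c.toNat + 32 := by
    simp only [PySem.Chars.lowerChar, h, if_true]
    exact pv_toNat_ofNat _ (by omega) (by omega)
  exact pv_isspace_toNat _ (by omega) (by omega)

theorem pv_upperChar_of_not_alpha (c : Char) (h : PySem.Chars.isalpha c = false) :
    PySem.Chars.upperChar c = c := by
  simp only [PySem.Chars.isalpha, Bool.or_eq_false_iff] at h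
  simp [PySem.Chars.upperChar, h.2]

-- case-mapping by title() never changes whether a character is whitespace
theorem pv_isspace_titleChar (c : Char) (pa : Bool) :
    PySem.Chars.isspace
      (if PySem.Chars.isalpha c then
         (if pa then PySem.Chars.lowerChar c else PySem.Chars.upperChar c)
       else c) = PySem.Chars.isspace c := by
  by_cases ha : PySem.Chars.isalpha c = true
  · have hs := pv_isspace_of_isalpha c ha
    have ha' := ha
    simp only [PySem.Chars.isalpha, Bool.or_eq_true] at ha'
    rcases ha' with h | h
    · cases pa
      · simp [ha, hs, PySem.Chars.upperChar, pv_islower_eq_false_of_isupper c h]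
      · simp [ha, hs, pv_isspace_lowerChar c h]
    · cases pa
      · simp [ha, hs, pv_isspace_upperChar c h]
      · simp [ha, hs, PySem.Chars.lowerChar, pv_isupper_eq_false_of_islower c h]
  · simp [ha]

-- split₀ returns exactly the word-initial characters (extracted via headD)
theorem pv_split₀_go_map :
    ∀ (cs cur : List Char) (acc : List (List Char)) (d : Char),
      (PySem.Chars.split₀.go cs cur acc).map (fun w => w.headD d) =
        acc.reverse.map (fun w => w.headD d) ++
          (if cur.isEmpty then pvCollect cs true
           else cur.reverse.headD d :: pvCollect cs false) := by
  intro cs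
  induction cs with
  | nil =>
    intro cur acc d
    cases cur <;> simp [PySem.Chars.split₀.go, pvCollect]
  | cons c rest ih =>
    intro cur acc d
    by_cases hs : PySem.Chars.isspace c = true
    · cases cur with
      | nil =>
        have hgo : PySem.Chars.split₀.go (c :: rest) [] acc =
            PySem.Chars.split₀.go rest [] acc := by
          simp [PySem.Chars.split₀.go, hs]
        rw [hgo, ih]
        simp [pvCollect, hs]
      | cons x xs =>
        have hgo : PySem.Chars.split₀.go (c :: rest) (x :: xs) acc =
            PySem.Chars.split₀.go rest [] ((x :: xs).reverse :: acc) := by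
          simp [PySem.Chars.split₀.go, hs]
        rw [hgo, ih]
        simp [pvCollect, hs]
    · have hs' : PySem.Chars.isspace c = false := by
        cases h : PySem.Chars.isspace c
        · rfl
        · exact absurd h hs
      have hgo : PySem.Chars.split₀.go (c :: rest) cur acc =
          PySem.Chars.split₀.go rest (c :: cur) acc := by
        simp [PySem.Chars.split₀.go, hs']
      rw [hgo, ih]
      cases cur with
      | nil => simp [pvCollect, hs']
      | cons x xs =>
        simp [pvCollect, hs']

theorem pv_split₀_map (cs : List Char) (d : Char) :
    (PySem.Chars.split₀ cs).map (fun w => w.headD d) = pvCollect cs true := by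
  have h := pv_split₀_go_map cs [] [] d
  simpa [PySem.Chars.split₀] using h

-- collecting the word-initial characters of the titled string = collecting the
-- uppercased word-initial characters of the original string
theorem pv_collect_title :
    ∀ (cs : List Char) (pa p : Bool), (p = true → pa = false) →
      pvCollect (pyTitleGo cs pa) p = pvCollectU cs p := by
  intro cs
  induction cs with
  | nil => intro pa p _; simp [pyTitleGo, pvCollect, pvCollectU]
  | cons c rest ih =>
    intro pa p hp
    simp only [pyTitleGo, pvCollect, pvCollectU, pv_isspace_titleChar]
    by_cases hcoll : (p && !(PySem.Chars.isspace c)) = true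
    · have hptrue : p = true := by cases p <;> simp_all
      have hpa : pa = false := hp hptrue
      have hc' : (if PySem.Chars.isalpha c then
          (if pa then PySem.Chars.lowerChar c else PySem.Chars.upperChar c)
        else c) = PySem.Chars.upperChar c := by
        by_cases ha : PySem.Chars.isalpha c = true
        · simp [ha, hpa]
        · have ha' : PySem.Chars.isalpha c = false := by
            cases h : PySem.Chars.isalpha c
            · rfl
            · exact absurd h ha
          simp [ha', pv_upperChar_of_not_alpha c ha']
      rw [hc']
      simp only [hcoll, if_true]
      have hsc : PySem.Chars.isspace c = false := by
        cases h : PySem.Chars.isspace c <;> simp_all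
      exact congrArg _ (ih _ _ (by simp [hsc]))
    · simp only [hcoll]
      rw [if_neg (by simp [hcoll])]
      exact ih _ _ (fun h => pv_not_alpha_of_isspace c h)

-- B's loop collects exactly pvCollectU
theorem pv_foldl_alt :
    ∀ (cs letters : List Char) (p : Bool),
      (cs.foldl
        (fun (st : List Char × Bool) c =>
          ((if st.2 && !(PySem.Chars.isspace c) then st.1 ++ [PySem.Chars.upperChar c] else st.1),
           PySem.Chars.isspace c))
        (letters, p)).1 = letters ++ pvCollectU cs p := by
  intro cs
  induction cs with
  | nil => intro letters p; simp [pvCollectU]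
  | cons c rest ih =>
    intro letters p
    by_cases h : (p && !(PySem.Chars.isspace c)) = true
    · simp only [List.foldl, h, if_true]
      rw [ih]
      simp [pvCollectU, h]
    · simp only [List.foldl]
      rw [if_neg (by simpa using h), ih]
      simp [pvCollectU, h]

theorem pv_join_firsts (ws : List (List Char)) :
    PySem.Chars.join [] (ws.map (fun name => [name.headD ' '])) =
      ws.map (fun w => w.headD ' ') := by
  have h := PySem.Chars.join_nil_singletons (ws.map (fun w => w.headD ' '))
  rw [List.map_map] at h
  simpa [Function.comp] using h

theorem pv_get_initials_eq (full_name : String) :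
    get_initials full_name = get_initials_alt full_name := by
  have hTitle : pvCollect (pyTitle full_name.toList) true = pvCollectU full_name.toList true := by
    simpa [pyTitle] using pv_collect_title full_name.toList false true (fun _ => rfl)
  have hA : get_initials full_name =
      String.ofList (pvCollectU full_name.toList true) := by
    simp only [get_initials]
    split_ifs with h2
    · have hsl : PySem.List.slice (PySem.Chars.split₀ (pyTitle full_name.toList))
          none (some 0) = [] := by
        rw [PySem.List.slice_to _ (by norm_num : (0:Int) ≤ 0)]
        simp
      rw [hsl]
      simp only [List.map_nil]
      have hemp : PySem.Chars.join ([] : List Char) [] = [] := by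
        simp [PySem.Chars.join, List.intercalate]
      rw [hemp, List.nil_append, pv_join_firsts, pv_split₀_map, hTitle]
    · rw [pv_join_firsts, pv_split₀_map, hTitle]
  have hB : get_initials_alt full_name =
      String.ofList (pvCollectU full_name.toList true) := by
    simp only [get_initials_alt]
    rw [pv_foldl_alt, List.nil_append]
    rw [PySem.Chars.join_nil_singletons]
  rw [hA, hB]

-- ===== VERDICT (by name: the statement is the Claim_ definition above) =====
theorem get_initials_spec : Claim_equal_get_initials := by
  intro full_name _
  unfold Spec_get_initials
  exact pv_get_initials_eq full_name
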